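-- pv_equiv track=rewrite | github.com/MohamedAhmedEz/AI | fit.py | course_timeSlot
-- ===== SOURCE A (Python) =====
-- def course_timeSlot(individual):
--     penalty = 0
--     course_time_slot = {}
--     for course, lecturer, time_slot, hall in individual:
--         if (course, time_slot) in course_time_slot:
--             penalty += 1
--         else:
--             course_time_slot[(course, time_slot)] = hall
--
--     return penalty
-- ===== SOURCE B (Python) =====
-- def course_timeSlot(individual):
--     pairs = [(course, time_slot) for course, lecturer, time_slot, hall in individual]
--     return sum(1 for i in range(len(pairs)) if pairs[i] in pairs[i+1:])
-- ===== Notes on version B (the rewrite author's own statement) =====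
-- stated objective: alternative
-- what changed: Replaces A's one-pass dict-membership counting (count elements whose pair was seen before) by a two-stage formulation: first extract the (course, time_slot) pair list, then count by a nested suffix scan the pairs that occur again later; both equal n minus the number of distinct pairs.
import Mathlib
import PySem

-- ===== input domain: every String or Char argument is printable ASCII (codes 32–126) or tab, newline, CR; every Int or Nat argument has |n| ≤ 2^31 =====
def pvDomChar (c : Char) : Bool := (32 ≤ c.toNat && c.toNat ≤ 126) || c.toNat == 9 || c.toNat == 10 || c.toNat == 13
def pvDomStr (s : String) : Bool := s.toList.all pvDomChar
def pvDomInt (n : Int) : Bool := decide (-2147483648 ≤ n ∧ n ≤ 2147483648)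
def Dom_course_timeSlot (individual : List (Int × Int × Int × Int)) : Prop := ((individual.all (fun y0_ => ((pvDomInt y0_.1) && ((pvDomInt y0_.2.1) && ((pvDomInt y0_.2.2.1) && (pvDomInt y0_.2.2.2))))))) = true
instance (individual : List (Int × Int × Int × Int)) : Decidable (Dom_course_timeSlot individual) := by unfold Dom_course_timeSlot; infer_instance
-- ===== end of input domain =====

-- B re-counts duplicates by a two-stage nested suffix scan (extract pair list, count pairs that
-- recur later) instead of A's one-pass dict-membership counting; objective: alternative.


-- ===== PORT A =====
def course_timeSlot (individual : List (Int × Int × Int × Int)) : Int :=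
  (individual.foldl
    (fun (st : Int × PySem.Dict (Int × Int) Int) e =>
      match e with
      | (course, _lecturer, time_slot, hall) =>
        if st.2.contains (course, time_slot) then
          (st.1 + 1, st.2)
        else
          (st.1, st.2.insert (course, time_slot) hall))
    (0, PySem.Dict.empty)).1

-- ===== PORT B =====
def course_timeSlot_alt (individual : List (Int × Int × Int × Int)) : Int :=
  let pairs : List (Int × Int) := individual.map (fun e => (e.1, e.2.2.1))
  (PySem.List.pyRange 0 (pairs.length : Int) 1).foldl
    (fun acc i =>
      if PySem.List.pyGetD pairs i (0, 0) ∈ PySem.List.slice pairs (some (i + 1)) none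
      then acc + 1 else acc) 0

-- ===== PRECONDITION & SPEC =====
def Spec_course_timeSlot (individual : List (Int × Int × Int × Int)) (out : Int) : Prop := out = course_timeSlot_alt individual
instance (individual : List (Int × Int × Int × Int)) (out : Int) : Decidable (Spec_course_timeSlot individual out) := by unfold Spec_course_timeSlot; infer_instance

-- ===== CLAIM (what is proved, stated in full; the proofs are below) =====
def Claim_equal_course_timeSlot : Prop := ∀ (individual : List (Int × Int × Int × Int)), Dom_course_timeSlot individual → Spec_course_timeSlot individual (course_timeSlot individual)

-- ===== LEMMAS AND PROOFS =====

-- the list of (course, time_slot) pairs of an individual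
def pvPairs (l : List (Int × Int × Int × Int)) : List (Int × Int) :=
  l.map (fun e => (e.1, e.2.2.1))

-- "count pairs that occur again later", structurally
def pvCa : List (Int × Int) → Int
  | [] => 0
  | p :: r => (if p ∈ r then 1 else 0) + pvCa r

-- A's loop invariant: penalty so far plus distinct-pair bookkeeping via Finset cards
theorem pvA_inv (l : List (Int × Int × Int × Int)) :
    ∀ (p : Int) (d : PySem.Dict (Int × Int) Int),
    (l.foldl
      (fun (st : Int × PySem.Dict (Int × Int) Int) e =>
        match e with
        | (course, _lecturer, time_slot, hall) =>
          if st.2.contains (course, time_slot) then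
            (st.1 + 1, st.2)
          else
            (st.1, st.2.insert (course, time_slot) hall))
      (p, d)).1
    = p + (l.length : Int) + (d.keys.toFinset.card : Int)
        - ((d.keys.toFinset ∪ (pvPairs l).toFinset).card : Int) := by
  induction l with
  | nil => intro p d; simp [pvPairs]
  | cons e rest ih =>
    intro p d
    obtain ⟨c, lec, ts, h⟩ := e
    simp only [pvPairs] at ih ⊢
    simp only [List.foldl, List.map_cons, List.toFinset_cons, List.length_cons]
    by_cases hc : d.contains (c, ts) = true
    · have hmem : (c, ts) ∈ d.keys.toFinset := by
        rw [List.mem_toFinset]; exact (PySem.Dict.contains_iff_mem_keys d (c, ts)).1 hc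
      have hU : d.keys.toFinset ∪ insert (c, ts) (rest.map (fun e => (e.1, e.2.2.1))).toFinset
          = d.keys.toFinset ∪ (rest.map (fun e => (e.1, e.2.2.1))).toFinset := by
        rw [Finset.union_insert, Finset.insert_eq_self.2 (Finset.mem_union_left _ hmem)]
      rw [if_pos hc, ih (p + 1) d, hU]
      push_cast; ring
    · have hc' : d.contains (c, ts) = false := by simpa using hc
      have hnm : (c, ts) ∉ d.keys.toFinset := by
        rw [List.mem_toFinset]; intro hm
        exact hc ((PySem.Dict.contains_iff_mem_keys d (c, ts)).2 hm)
      rw [if_neg hc, ih p (d.insert (c, ts) h)]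
      rw [PySem.Dict.keys_insert_of_not_contains d h hc']
      have hK : (d.keys ++ [(c, ts)]).toFinset = insert (c, ts) d.keys.toFinset := by
        simp [List.toFinset_append, Finset.union_comm]
      rw [hK, Finset.card_insert_of_notMem hnm,
        Finset.insert_union, ← Finset.union_insert]
      push_cast; ring

-- the suffix-scan count equals length minus number of distinct pairs
theorem pvCa_card (ps : List (Int × Int)) :
    pvCa ps = (ps.length : Int) - (ps.toFinset.card : Int) := by
  induction ps with
  | nil => simp [pvCa]
  | cons p r ih =>
    simp only [pvCa, List.length_cons, List.toFinset_cons]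
    by_cases hp : p ∈ r
    · rw [if_pos hp, Finset.insert_eq_self.2 (List.mem_toFinset.2 hp), ih]
      push_cast; ring
    · rw [if_neg hp, Finset.card_insert_of_notMem (by simpa using hp), ih]
      push_cast; ring

-- B's index/slice fold over range(len) computes the structural suffix-scan count
theorem pvB_fold (ps : List (Int × Int)) :
    ∀ (acc : Int),
    (List.range ps.length).foldl
      (fun acc (k : Nat) =>
        if PySem.List.pyGetD ps (k : Int) (0, 0) ∈ PySem.List.slice ps (some ((k : Int) + 1)) none
        then acc + 1 else acc) acc
    = acc + pvCa ps := by
  induction ps with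
  | nil => intro acc; simp [pvCa]
  | cons p r ih =>
    intro acc
    simp only [List.length_cons]
    rw [List.range_succ_eq_map, List.foldl_cons, List.foldl_map]
    have h0 : PySem.List.pyGetD (p :: r) ((0 : Nat) : Int) (0, 0) = p := by
      simp
    have hs0 : PySem.List.slice (p :: r) (some (((0 : Nat) : Int) + 1)) none = r := by
      have e1 : (((0 : Nat) : Int) + 1) = ((1 : Nat) : Int) := by omega
      rw [e1, PySem.List.slice_from_natCast]
      rfl
    have hstep :
        (fun (acc : Int) (k : Nat) =>
          if PySem.List.pyGetD (p :: r) ((k + 1 : Nat) : Int) (0, 0)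
              ∈ PySem.List.slice (p :: r) (some (((k + 1 : Nat) : Int) + 1)) none
          then acc + 1 else acc)
        = (fun (acc : Int) (k : Nat) =>
          if PySem.List.pyGetD r (k : Int) (0, 0) ∈ PySem.List.slice r (some ((k : Int) + 1)) none
          then acc + 1 else acc) := by
      funext acc k
      have hg : PySem.List.pyGetD (p :: r) ((k + 1 : Nat) : Int) (0, 0)
          = PySem.List.pyGetD r (k : Int) (0, 0) := by
        rw [PySem.List.pyGetD_natCast, PySem.List.pyGetD_natCast]
        simp [List.getD]
      have hsl : PySem.List.slice (p :: r) (some (((k + 1 : Nat) : Int) + 1)) none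
          = PySem.List.slice r (some ((k : Int) + 1)) none := by
        have e1 : (((k + 1 : Nat) : Int) + 1) = ((k + 2 : Nat) : Int) := by omega
        have e2 : ((k : Int) + 1) = ((k + 1 : Nat) : Int) := by omega
        rw [e1, e2, PySem.List.slice_from_natCast, PySem.List.slice_from_natCast]
        simp
      rw [hg, hsl]
    rw [h0, hs0, hstep, ih]
    by_cases hp : p ∈ r
    · rw [if_pos hp]; simp [pvCa, hp]; ring
    · rw [if_neg hp]; simp [pvCa, hp]

-- range(n) as a list of Ints is the cast of List.range n
theorem pvRange_cast (n : Nat) :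
    PySem.List.pyRange 0 (n : Int) 1 = (List.range n).map (fun (k : Nat) => (k : Int)) := by
  rw [PySem.List.pyRange_one]
  simp [List.map_eq_flatMap]

-- ===== VERDICT (by name: the statement is the Claim_ definition above) =====
theorem course_timeSlot_spec : Claim_equal_course_timeSlot := by
  intro individual _
  unfold Spec_course_timeSlot
  have hA := pvA_inv individual 0 PySem.Dict.empty
  simp only [pvPairs] at hA
  have hr := pvRange_cast (individual.map (fun e => (e.1, e.2.2.1))).length
  have hB := pvB_fold (individual.map (fun e => (e.1, e.2.2.1))) 0
  have hBport : course_timeSlot_alt individual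
      = pvCa (individual.map (fun e => (e.1, e.2.2.1))) := by
    have hdef : course_timeSlot_alt individual
        = (PySem.List.pyRange 0 (((individual.map (fun e => (e.1, e.2.2.1))).length : Int)) 1).foldl
            (fun acc i =>
              if PySem.List.pyGetD (individual.map (fun e => (e.1, e.2.2.1))) i (0, 0)
                  ∈ PySem.List.slice (individual.map (fun e => (e.1, e.2.2.1))) (some (i + 1)) none
              then acc + 1 else acc) 0 := rfl
    rw [hdef, hr, List.foldl_map, hB]
    ring
  rw [hBport, pvCa_card]
  unfold course_timeSlot
  rw [hA, PySem.Dict.keys_empty]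
  simp
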